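-- pv_equiv track=rewrite | github.com/study-for-interview/algorithm-study | hanjo/개인용/programmers/탐욕법/L2_조이스틱/solution.py | solution
-- ===== SOURCE A (Python) =====
-- import string
--
-- def solution(name):
--     al = string.ascii_uppercase
--     # 효율적인 좌우 이동거리 추출
--     l_name = len(name)
--     start, end = 0, 0
--     lr = []
--     while True:
--         if l_name > end+1 and name[end+1] == 'A':
--             end += 1
--         else:
--             lr.append((start*2-1) + (l_name-end))
--             if l_name != end+1:
--                 start = end+1
--                 end = start
--             else:
--                 break
--     # 알파벳 상하 최소 이동 추출
--     ud = 0
--     for n in name: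
--         n_idx = al.index(n)
--         if n_idx > 13:
--             n_idx = 26 - n_idx
--         ud += n_idx
--     return ud + min(lr)
-- ===== SOURCE B (Python) =====
-- def solution(name):
--     n = len(name)
--     upper = "ABCDEFGHIJKLMNOPQRSTUVWXYZ"
--     # up/down: closed form min(k, 26 - k) per letter
--     ud = 0
--     for c in name:
--         k = upper.index(c)
--         ud += min(k, 26 - k)
--     # left/right: one reverse pass; j = first index > i holding a non-'A' char
--     j = n
--     best = None
--     i = n - 1
--     while i >= 0:
--         cand = 2 * i + (n - j)
--         if best is None or cand < best:
--             best = cand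
--         if name[i] != 'A':
--             j = i
--         i -= 1
--     return ud + best
-- ===== Notes on version B (the rewrite author's own statement) =====
-- stated objective: alternative
-- what changed: Replaces A's block-jumping while-loop (building a candidate list per run of 'A's, then min()) with a single reverse scan maintaining the next non-'A' index and a running minimum, and folds A's branchy up/down adjustment into min(k, 26-k) per letter.
import Mathlib
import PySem

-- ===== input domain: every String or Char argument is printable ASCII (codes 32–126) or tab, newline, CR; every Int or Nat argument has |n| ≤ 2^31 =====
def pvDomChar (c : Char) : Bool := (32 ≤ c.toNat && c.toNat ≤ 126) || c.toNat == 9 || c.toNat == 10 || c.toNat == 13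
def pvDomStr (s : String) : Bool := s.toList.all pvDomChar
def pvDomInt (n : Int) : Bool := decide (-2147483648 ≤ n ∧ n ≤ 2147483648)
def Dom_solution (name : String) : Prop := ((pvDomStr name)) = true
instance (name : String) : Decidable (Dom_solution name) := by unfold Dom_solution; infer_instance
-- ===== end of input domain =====

-- B replaces A's block-jumping candidate-list greedy by a single reverse scan with a running minimum
-- (same return value on every input A returns on; 'alternative' objective, no speed claim).

-- ===== PORT A =====
-- the while-True loop of A: state (start, end, lr); fuel only guards termination (A diverges on ""; excluded by Pre_)
def aLoop (cs : List Char) : Nat → Int → Int → List Int → List Int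
  | 0, _, _, lr => lr
  | fuel+1, start, e, lr =>
    if ((cs.length : Int) > e + 1 ∧ PySem.List.pyGet? cs (e + 1) = some 'A') then
      aLoop cs fuel start (e + 1) lr
    else
      if (cs.length : Int) ≠ e + 1 then
        aLoop cs fuel (e + 1) (e + 1) (lr ++ [(start * 2 - 1) + ((cs.length : Int) - e)])
      else lr ++ [(start * 2 - 1) + ((cs.length : Int) - e)]

def solution (name : String) : Int :=
  let al : String := "ABCDEFGHIJKLMNOPQRSTUVWXYZ"
  let cs := name.toList
  let lr := aLoop cs (2 * cs.length + 1) 0 0 []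
  let ud := cs.foldl (fun ud c =>
    let n_idx := PySem.Str.find al (String.singleton c)   -- al.index(n); differs from Python only where Python raises (outside Pre_)
    ud + (if n_idx > 13 then 26 - n_idx else n_idx)) 0
  ud + (PySem.List.min? lr (fun x => x)).getD 0   -- min(lr); lr = [] unreachable under Pre_

-- ===== PORT B =====
-- the reverse while-loop of Source B: k = i + 1 remaining iterations, state (j, best)
def bLoop (cs : List Char) : Nat → Int → Option Int → Option Int
  | 0, _, best => best
  | k+1, j, best =>
    let i : Int := k
    let cand := 2 * i + ((cs.length : Int) - j)
    let best' := match best with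
      | none => some cand
      | some b => if cand < b then some cand else some b
    let j' := if PySem.List.pyGet? cs i ≠ some 'A' then i else j
    bLoop cs k j' best'

def solution_alt (name : String) : Int :=
  let upper : String := "ABCDEFGHIJKLMNOPQRSTUVWXYZ"
  let cs := name.toList
  let ud := cs.foldl (fun ud c =>
    let k := PySem.Str.find upper (String.singleton c)   -- upper.index(c); differs from Python only where Python raises (outside Pre_)
    ud + min k (26 - k)) 0
  let best := bLoop cs cs.length (cs.length : Int) none
  ud + best.getD 0   -- 'ud + best' with best = None raises in Python; unreachable under Pre_

-- ===== PRECONDITION & SPEC =====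
-- Pre_ excludes the empty string (A's while-True loop never terminates there) and any character
-- outside 'A'..'Z' (string.ascii_uppercase.index raises ValueError there); A returns on nothing else.
def Pre_solution (name : String) : Prop :=
  name.toList ≠ [] ∧ (name.toList.all (fun c => 65 ≤ c.toNat && c.toNat ≤ 90)) = true
instance (name : String) : Decidable (Pre_solution name) := by unfold Pre_solution; infer_instance

def pvWitness_solution : String := "BANANA"

def Spec_solution (name : String) (out : Int) : Prop := out = solution_alt name
instance (name : String) (out : Int) : Decidable (Spec_solution name out) := by unfold Spec_solution; infer_instance

-- ===== CLAIM (what is proved, stated in full; the proofs are below) =====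
def Claim_equal_solution : Prop := ∀ (name : String), Dom_solution name → Pre_solution name → Spec_solution name (solution name)

-- ===== LEMMAS AND PROOFS =====

-- gd t = index of the first non-'A' character of t (t.length if none)
def gd : List Char → Nat
  | [] => 0
  | c :: t => if c = 'A' then gd t + 1 else 0

-- gg cs i = first index ≥ i holding a non-'A' character (cs.length if none; = i for i ≥ length)
def gg (cs : List Char) (i : Nat) : Nat := i + gd (cs.drop i)

-- ff cs i = the left/right-cost candidate attached to index i
def ff (cs : List Char) (i : Nat) : Int :=
  2 * (i : Int) + ((cs.length : Int) - (gg cs (i + 1) : Int))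

theorem gd_le_length (t : List Char) : gd t ≤ t.length := by
  induction t with
  | nil => simp [gd]
  | cons c t ih => simp only [gd, List.length_cons]; split <;> omega

theorem le_gg (cs : List Char) (i : Nat) : i ≤ gg cs i := Nat.le_add_right _ _

theorem gg_le (cs : List Char) (i : Nat) (h : i ≤ cs.length) : gg cs i ≤ cs.length := by
  have := gd_le_length (cs.drop i)
  simp only [List.length_drop] at this
  unfold gg; omega

theorem gg_of_ge (cs : List Char) (i : Nat) (h : cs.length ≤ i) : gg cs i = i := by
  unfold gg
  rw [List.drop_eq_nil_of_le h]
  simp [gd]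

theorem drop_cons (cs : List Char) (i : Nat) (h : i < cs.length) :
    cs.drop i = cs[i] :: cs.drop (i + 1) := (List.getElem_cons_drop h).symm

theorem gg_of_ne (cs : List Char) (i : Nat) (h : i < cs.length) (hA : cs[i] ≠ 'A') :
    gg cs i = i := by
  unfold gg
  rw [drop_cons cs i h]
  simp [gd, hA]

theorem gg_of_eq (cs : List Char) (i : Nat) (h : i < cs.length) (hA : cs[i] = 'A') :
    gg cs i = gg cs (i + 1) := by
  unfold gg
  rw [drop_cons cs i h]
  simp [gd, hA]
  omega

-- every index of the run [i, gg cs i) is 'A', so gg is constant on it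
theorem gg_run_step (cs : List Char) (i : Nat) (hlt : i < gg cs i) : gg cs i = gg cs (i + 1) := by
  have hin : i < cs.length := by
    by_contra hn
    have := gg_of_ge cs i (by omega)
    omega
  have hA : cs[i] = 'A' := by
    by_contra hn
    have := gg_of_ne cs i hin hn
    omega
  exact gg_of_eq cs i hin hA

theorem gg_run_aux (cs : List Char) : ∀ d k i, k - i ≤ d → i ≤ k → k < gg cs i → gg cs (k + 1) = gg cs i := by
  intro d
  induction d with
  | zero =>
    intro k i hd hik hlt
    have hik' : i = k := by omega
    subst hik'
    exact (gg_run_step cs i (by omega)).symm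
  | succ d ih =>
    intro k i hd hik hlt
    rcases Nat.eq_or_lt_of_le hik with rfl | hlt'
    · exact (gg_run_step cs i (by omega)).symm
    · have hstep := gg_run_step cs i (by omega)
      have := ih k (i + 1) (by omega) (by omega) (by omega)
      omega

theorem gg_run (cs : List Char) : ∀ k i, i ≤ k → k < gg cs i → gg cs (k + 1) = gg cs i := by
  intro k i
  exact gg_run_aux cs (k - i) k i le_rfl

-- candidates dominate within a run: ff cs s is minimal among [s, gg cs (s+1))
theorem dom_le (cs : List Char) (s k : Nat) (hsk : s ≤ k) (hk : k < gg cs (s + 1)) :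
    ff cs s ≤ ff cs k := by
  rcases Nat.eq_or_lt_of_le hsk with rfl | hlt
  · exact le_refl _
  · have h1 : gg cs (k + 1) = gg cs (s + 1) := gg_run cs k (s + 1) (by omega) hk
    unfold ff
    rw [h1]
    have : (s : Int) < (k : Int) := by exact_mod_cast hlt
    omega

-- the candidate list A's loop produces, block start by block start
def candList (cs : List Char) (s : Nat) : List Int :=
  ff cs s ::
    (if h : gg cs (s + 1) < cs.length then candList cs (gg cs (s + 1)) else [])
termination_by cs.length - s
decreasing_by
  have := le_gg cs (s + 1)
  omega

def listMin : List Int → Int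
  | [] => 0
  | a :: t => t.foldl min a

theorem foldl_min_min (l : List Int) : ∀ a b : Int, l.foldl min (min a b) = min a (l.foldl min b) := by
  induction l with
  | nil => intro a b; simp
  | cons c t ih =>
    intro a b
    simp only [List.foldl_cons]
    rw [min_assoc, ih]

theorem listMin_cons (a : Int) (l : List Int) (h : l ≠ []) :
    listMin (a :: l) = min a (listMin l) := by
  cases l with
  | nil => simp at h
  | cons b t => simp only [listMin, List.foldl_cons, foldl_min_min]

theorem candList_min (cs : List Char) (s : Nat) (hs : s < cs.length) :
    listMin (candList cs s) =
      (Finset.Ico s cs.length).inf' (Finset.nonempty_Ico.mpr hs) (ff cs) := by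
  rw [candList]
  by_cases h : gg cs (s + 1) < cs.length
  · rw [dif_pos h]
    have hne : candList cs (gg cs (s + 1)) ≠ [] := by rw [candList]; simp
    rw [listMin_cons _ _ hne, candList_min cs (gg cs (s + 1)) h]
    have hsj : s < gg cs (s + 1) := by have := le_gg cs (s + 1); omega
    apply le_antisymm
    · apply Finset.le_inf'
      intro k hk
      simp only [Finset.mem_Ico] at hk
      by_cases hkj : k < gg cs (s + 1)
      · exact le_trans (min_le_left _ _) (dom_le cs s k hk.1 hkj)
      · exact le_trans (min_le_right _ _)
          (Finset.inf'_le _ (by simp only [Finset.mem_Ico]; omega))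
    · apply le_min
      · exact Finset.inf'_le _ (by simp only [Finset.mem_Ico]; omega)
      · apply Finset.le_inf'
        intro k hk
        simp only [Finset.mem_Ico] at hk
        exact Finset.inf'_le _ (by simp only [Finset.mem_Ico]; omega)
  · rw [dif_neg h]
    have hj : gg cs (s + 1) = cs.length := by
      have := gg_le cs (s + 1) (by omega); omega
    simp only [listMin, List.foldl_nil]
    apply le_antisymm
    · apply Finset.le_inf'
      intro k hk
      simp only [Finset.mem_Ico] at hk
      exact dom_le cs s k hk.1 (by omega)
    · exact Finset.inf'_le _ (by simp only [Finset.mem_Ico]; omega)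
termination_by cs.length - s
decreasing_by
  have := le_gg cs (s + 1)
  omega

-- ===== A's loop produces exactly candList =====
theorem aLoop_eq (cs : List Char) : ∀ (fuel : Nat) (s e : Nat) (lr : List Int),
    e < cs.length → gg cs (s + 1) = gg cs (e + 1) → 2 * (cs.length - e) ≤ fuel →
    aLoop cs fuel (s : Int) (e : Int) lr = lr ++ candList cs s := by
  intro fuel
  induction fuel with
  | zero => intro s e lr he _ hf; omega
  | succ fuel ih =>
    intro s e lr he hg hf
    have hcast : ((e : Int) + 1) = ((e + 1 : Nat) : Int) := by push_cast; ring
    rw [aLoop, hcast, PySem.List.pyGet?_natCast]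
    by_cases hc : ((cs.length : Int) > ((e + 1 : Nat) : Int) ∧ cs[(e + 1 : Nat)]? = some 'A')
    · rw [if_pos hc]
      have he1 : e + 1 < cs.length := by exact_mod_cast hc.1
      have hA : cs[e+1] = 'A' := by
        have := hc.2
        rw [List.getElem?_eq_getElem he1] at this
        exact Option.some.inj this
      have hg2 := gg_of_eq cs (e + 1) he1 hA
      exact ih s (e + 1) lr he1 (by omega) (by omega)
    · rw [if_neg hc]
      -- the A-run ends here: gg cs (e+1) = e+1
      have hend : gg cs (e + 1) = e + 1 := by
        rcases Nat.lt_or_ge (e + 1) cs.length with h1 | h1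
        · have hA : cs[e+1] ≠ 'A' := by
            intro hA
            exact hc ⟨by exact_mod_cast h1, by rw [List.getElem?_eq_getElem h1, hA]⟩
          exact gg_of_ne cs (e + 1) h1 hA
        · exact gg_of_ge cs (e + 1) h1
      have hcand : ((s : Int) * 2 - 1) + ((cs.length : Int) - (e : Int)) = ff cs s := by
        unfold ff
        rw [hg, hend]
        push_cast
        ring
      by_cases hn : (cs.length : Int) ≠ ((e + 1 : Nat) : Int)
      · rw [if_pos hn]
        have hne : e + 1 < cs.length := by
          have h' : cs.length ≠ e + 1 := fun h => hn (by exact_mod_cast h)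
          omega
        have hrec := ih (e + 1) (e + 1) (lr ++ [((s : Int) * 2 - 1) + ((cs.length : Int) - (e : Int))])
          hne rfl (by omega)
        rw [hrec, hcand]
        have hlt : gg cs (s + 1) < cs.length := by omega
        have hgs : gg cs (s + 1) = e + 1 := by omega
        have hcs : candList cs s = ff cs s :: candList cs (e + 1) := by
          rw [candList, dif_pos hlt, hgs]
        rw [hcs]
        simp [List.append_assoc]
      · rw [if_neg hn]
        have hlen : cs.length = e + 1 := by
          have := not_ne_iff.mp hn
          exact_mod_cast this
        rw [hcand]
        have hcs : candList cs s = [ff cs s] := by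
          rw [candList, dif_neg (by omega : ¬ gg cs (s + 1) < cs.length)]
        rw [hcs]

-- ===== B's loop computes the running minimum of ff over all indices =====
theorem bLoop_step (cs : List Char) (k : Nat) (hk : k < cs.length) (best : Option Int) :
    bLoop cs (k + 1) ((gg cs (k + 1) : Nat) : Int) best =
      bLoop cs k ((gg cs k : Nat) : Int)
        (some (match best with | none => ff cs k | some b => min b (ff cs k))) := by
  simp only [bLoop]
  have hcand : 2 * ((k : Nat) : Int) + ((cs.length : Int) - ((gg cs (k + 1) : Nat) : Int)) = ff cs k := rfl
  have hj : (if PySem.List.pyGet? cs ((k : Nat) : Int) ≠ some 'A'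
      then ((k : Nat) : Int) else ((gg cs (k + 1) : Nat) : Int)) = ((gg cs k : Nat) : Int) := by
    rw [PySem.List.pyGet?_natCast, List.getElem?_eq_getElem hk]
    by_cases hA : cs[k] = 'A'
    · rw [if_neg (by simp [hA]), gg_of_eq cs k hk hA]
    · rw [if_pos (by simp [hA]), gg_of_ne cs k hk hA]
  cases best with
  | none => simp only [hcand, hj]
  | some b =>
    simp only [hcand, hj]
    have hmin : min b (ff cs k) = if ff cs k < b then ff cs k else b := by
      rw [min_def]; split_ifs <;> omega
    rw [hmin]
    split_ifs <;> rfl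

theorem inf'_eq_inf' (s t : Finset Nat) (hs : s.Nonempty) (ht : t.Nonempty) (h : s = t)
    (f : Nat → Int) : s.inf' hs f = t.inf' ht f := by
  subst h; rfl

theorem inf'_range_one (f : Nat → Int) (h : (Finset.range 1).Nonempty) :
    (Finset.range 1).inf' h f = f 0 := by
  apply le_antisymm
  · exact Finset.inf'_le _ (by simp)
  · apply Finset.le_inf'
    intro k hk
    have : k = 0 := by simpa using hk
    subst this
    exact le_rfl

theorem inf'_range_succ (f : Nat → Int) (k : Nat) (hk : 0 < k)
    (h1 : (Finset.range (k + 1)).Nonempty) (h2 : (Finset.range k).Nonempty) :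
    (Finset.range (k + 1)).inf' h1 f = min (f k) ((Finset.range k).inf' h2 f) := by
  apply le_antisymm
  · apply le_min
    · exact Finset.inf'_le _ (by simp)
    · apply Finset.le_inf'
      intro j hj
      exact Finset.inf'_le _ (by simp; simp at hj; omega)
  · apply Finset.le_inf'
    intro j hj
    have hj' : j < k + 1 := by simpa using hj
    by_cases hjk : j = k
    · subst hjk; exact min_le_left _ _
    · exact le_trans (min_le_right _ _) (Finset.inf'_le _ (by simp; omega))

theorem bLoop_inf (cs : List Char) : ∀ (k : Nat) (hpos : 0 < k), k ≤ cs.length → ∀ b : Int,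
    bLoop cs k ((gg cs k : Nat) : Int) (some b) =
      some (min b ((Finset.range k).inf' ⟨0, Finset.mem_range.mpr hpos⟩ (ff cs))) := by
  intro k
  induction k with
  | zero => intro h; omega
  | succ k ih =>
    intro _ hk b
    have hstep := bLoop_step cs k (show k < cs.length by omega) (some b)
    rw [hstep]
    by_cases hk0 : k = 0
    · subst hk0
      simp only [bLoop]
      rw [inf'_range_one (ff cs)]
    · have hrec := ih (by omega) (by omega) (min b (ff cs k))
      rw [hrec]
      rw [inf'_range_succ (ff cs) k (by omega) _ ⟨0, Finset.mem_range.mpr (by omega)⟩]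
      congr 1
      simp [min_assoc]

theorem bLoop_entry (cs : List Char) (hn : 0 < cs.length) :
    bLoop cs cs.length ((cs.length : Int)) none =
      some ((Finset.range cs.length).inf' ⟨0, Finset.mem_range.mpr hn⟩ (ff cs)) := by
  obtain ⟨k, hk⟩ : ∃ k, cs.length = k + 1 := ⟨cs.length - 1, by omega⟩
  have key : bLoop cs (k + 1) (((k + 1 : Nat)) : Int) none =
      some ((Finset.range (k + 1)).inf' ⟨0, Finset.mem_range.mpr (by omega)⟩ (ff cs)) := by
    have hggn : (((k + 1 : Nat)) : Int) = ((gg cs (k + 1) : Nat) : Int) := by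
      rw [gg_of_ge cs (k + 1) (by omega)]
    rw [hggn, bLoop_step cs k (show k < cs.length by omega) none]
    by_cases hk0 : k = 0
    · subst hk0
      simp only [bLoop]
      rw [inf'_range_one (ff cs)]
    · rw [bLoop_inf cs k (by omega) (by omega) (ff cs k)]
      rw [inf'_range_succ (ff cs) k (by omega) _ ⟨0, Finset.mem_range.mpr (by omega)⟩]
  have h1 : bLoop cs cs.length ((cs.length : Int)) none = bLoop cs (k + 1) (((k + 1 : Nat)) : Int) none := by
    rw [hk]
  rw [h1, key]
  congr 1
  exact inf'_eq_inf' _ _ _ _ (by rw [hk]) _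

-- ===== up/down cost: the .index lookup is ord(c) - 65 on 'A'..'Z' =====
theorem char_eq_of_toNat_eq {c d : Char} (h : c.toNat = d.toNat) : c = d := by
  apply Char.ext
  exact UInt32.toNat_inj.mp h

theorem find_al (c : Char) (h1 : 65 ≤ c.toNat) (h2 : c.toNat ≤ 90) :
    PySem.Str.find "ABCDEFGHIJKLMNOPQRSTUVWXYZ" (String.singleton c) = (c.toNat : Int) - 65 := by
  rcases (by omega : c.toNat = 65 ∨ c.toNat = 66 ∨ c.toNat = 67 ∨ c.toNat = 68 ∨ c.toNat = 69 ∨ c.toNat = 70 ∨ c.toNat = 71 ∨ c.toNat = 72 ∨ c.toNat = 73 ∨ c.toNat = 74 ∨ c.toNat = 75 ∨ c.toNat = 76 ∨ c.toNat = 77 ∨ c.toNat = 78 ∨ c.toNat = 79 ∨ c.toNat = 80 ∨ c.toNat = 81 ∨ c.toNat = 82 ∨ c.toNat = 83 ∨ c.toNat = 84 ∨ c.toNat = 85 ∨ c.toNat = 86 ∨ c.toNat = 87 ∨ c.toNat = 88 ∨ c.toNat = 89 ∨ c.toNat = 90) with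
    hk|hk|hk|hk|hk|hk|hk|hk|hk|hk|hk|hk|hk|hk|hk|hk|hk|hk|hk|hk|hk|hk|hk|hk|hk|hk <;>
    first
      | (have hc : c = 'A' := char_eq_of_toNat_eq (by rw [hk]; rfl); subst hc; decide)
      | (have hc : c = 'B' := char_eq_of_toNat_eq (by rw [hk]; rfl); subst hc; decide)
      | (have hc : c = 'C' := char_eq_of_toNat_eq (by rw [hk]; rfl); subst hc; decide)
      | (have hc : c = 'D' := char_eq_of_toNat_eq (by rw [hk]; rfl); subst hc; decide)
      | (have hc : c = 'E' := char_eq_of_toNat_eq (by rw [hk]; rfl); subst hc; decide)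
      | (have hc : c = 'F' := char_eq_of_toNat_eq (by rw [hk]; rfl); subst hc; decide)
      | (have hc : c = 'G' := char_eq_of_toNat_eq (by rw [hk]; rfl); subst hc; decide)
      | (have hc : c = 'H' := char_eq_of_toNat_eq (by rw [hk]; rfl); subst hc; decide)
      | (have hc : c = 'I' := char_eq_of_toNat_eq (by rw [hk]; rfl); subst hc; decide)
      | (have hc : c = 'J' := char_eq_of_toNat_eq (by rw [hk]; rfl); subst hc; decide)
      | (have hc : c = 'K' := char_eq_of_toNat_eq (by rw [hk]; rfl); subst hc; decide)
      | (have hc : c = 'L' := char_eq_of_toNat_eq (by rw [hk]; rfl); subst hc; decide)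
      | (have hc : c = 'M' := char_eq_of_toNat_eq (by rw [hk]; rfl); subst hc; decide)
      | (have hc : c = 'N' := char_eq_of_toNat_eq (by rw [hk]; rfl); subst hc; decide)
      | (have hc : c = 'O' := char_eq_of_toNat_eq (by rw [hk]; rfl); subst hc; decide)
      | (have hc : c = 'P' := char_eq_of_toNat_eq (by rw [hk]; rfl); subst hc; decide)
      | (have hc : c = 'Q' := char_eq_of_toNat_eq (by rw [hk]; rfl); subst hc; decide)
      | (have hc : c = 'R' := char_eq_of_toNat_eq (by rw [hk]; rfl); subst hc; decide)
      | (have hc : c = 'S' := char_eq_of_toNat_eq (by rw [hk]; rfl); subst hc; decide)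
      | (have hc : c = 'T' := char_eq_of_toNat_eq (by rw [hk]; rfl); subst hc; decide)
      | (have hc : c = 'U' := char_eq_of_toNat_eq (by rw [hk]; rfl); subst hc; decide)
      | (have hc : c = 'V' := char_eq_of_toNat_eq (by rw [hk]; rfl); subst hc; decide)
      | (have hc : c = 'W' := char_eq_of_toNat_eq (by rw [hk]; rfl); subst hc; decide)
      | (have hc : c = 'X' := char_eq_of_toNat_eq (by rw [hk]; rfl); subst hc; decide)
      | (have hc : c = 'Y' := char_eq_of_toNat_eq (by rw [hk]; rfl); subst hc; decide)
      | (have hc : c = 'Z' := char_eq_of_toNat_eq (by rw [hk]; rfl); subst hc; decide)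

theorem ud_char (c : Char) (h1 : 65 ≤ c.toNat) (h2 : c.toNat ≤ 90) (ud : Int) :
    ud + (if PySem.Str.find "ABCDEFGHIJKLMNOPQRSTUVWXYZ" (String.singleton c) > 13 then
            26 - PySem.Str.find "ABCDEFGHIJKLMNOPQRSTUVWXYZ" (String.singleton c)
          else PySem.Str.find "ABCDEFGHIJKLMNOPQRSTUVWXYZ" (String.singleton c)) =
    ud + min (PySem.Str.find "ABCDEFGHIJKLMNOPQRSTUVWXYZ" (String.singleton c))
             (26 - PySem.Str.find "ABCDEFGHIJKLMNOPQRSTUVWXYZ" (String.singleton c)) := by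
  rw [find_al c h1 h2]
  have h1' : (65 : Int) ≤ (c.toNat : Int) := by exact_mod_cast h1
  have h2' : (c.toNat : Int) ≤ 90 := by exact_mod_cast h2
  rw [min_def]
  split_ifs <;> omega

-- ===== VERDICT (by name: the statement is the Claim_ definition above) =====
theorem solution_spec : Claim_equal_solution := by
  intro name _ hpre
  obtain ⟨hne, hupb⟩ := hpre
  have hup : ∀ c ∈ name.toList, 65 ≤ c.toNat ∧ c.toNat ≤ 90 := by
    intro c hc
    have := List.all_eq_true.mp hupb c hc
    simpa using this
  simp only [Spec_solution, solution, solution_alt]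
  have hn : 0 < name.toList.length := List.length_pos_iff.mpr hne
  -- up/down sums agree characterwise
  have hud : name.toList.foldl (fun ud c =>
      let n_idx := PySem.Str.find "ABCDEFGHIJKLMNOPQRSTUVWXYZ" (String.singleton c)
      ud + (if n_idx > 13 then 26 - n_idx else n_idx)) 0 =
    name.toList.foldl (fun ud c =>
      let k := PySem.Str.find "ABCDEFGHIJKLMNOPQRSTUVWXYZ" (String.singleton c)
      ud + min k (26 - k)) 0 := by
    apply PySem.List.foldl_congr_mem'
    intro c hc ud
    exact ud_char c (hup c hc).1 (hup c hc).2 ud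
  -- left/right minima agree
  have hA : aLoop name.toList (2 * name.toList.length + 1) 0 0 [] = candList name.toList 0 := by
    have := aLoop_eq name.toList (2 * name.toList.length + 1) 0 0 [] hn rfl (by omega)
    simpa using this
  have hAmin : (PySem.List.min? (candList name.toList 0) (fun x => x)).getD 0 =
      listMin (candList name.toList 0) := by
    rw [candList]
    rw [PySem.List.min?_id_cons]
    rfl
  have hB := bLoop_entry name.toList hn
  rw [hud, hA, hAmin, hB, candList_min name.toList 0 hn]
  rw [Option.getD_some]
  congr 1
  exact inf'_eq_inf' _ _ _ _ (congrFun Finset.range_eq_Ico _).symm _
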